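-- pv_equiv track=rewrite | github.com/bdamason/cursor-context | scripts/process_arr_waterfall.py | find_section_indices
-- ===== SOURCE A (Python) =====
-- def find_section_indices(columns):
--     """
--     Find the starting indices of each major section in the spreadsheet.
--     Returns dict with section names and their starting column indices.
--     """
--     sections = {
--         'arr_start': None,
--         'netchange_start': None,
--         'reason_start': None,
--         'filters_start': None
--     }
--
--     for idx, col in enumerate(columns):
--         col_str = str(col)
--         if col_str == 'ARR by Period by Product':
--             sections['arr_start'] = idx
--         elif col_str == 'Net Change by Period':
--             sections['netchange_start'] = idx
--         elif col_str == 'Net Change Reason by Period':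
--             sections['reason_start'] = idx
--         elif col_str == 'Net Change Filters':
--             sections['filters_start'] = idx
--
--     return sections
-- ===== SOURCE B (Python) =====
-- def find_section_indices(columns):
--     # Two phases: build a full name->index map (last occurrence wins), then four lookups.
--     col_index = {}
--     for idx, col in enumerate(columns):
--         col_index[str(col)] = idx
--     section_names = [
--         ('ARR by Period by Product', 'arr_start'),
--         ('Net Change by Period', 'netchange_start'),
--         ('Net Change Reason by Period', 'reason_start'),
--         ('Net Change Filters', 'filters_start'),
--     ]
--     return {key: col_index.get(name) for name, key in section_names}
-- ===== Notes on version B (the rewrite author's own statement) =====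
-- stated objective: alternative
-- what changed: A matches each column against the four section names in one if/elif scan; B first builds a complete name->index dict over all columns (last occurrence overwrites) and then fills the four-key result by four dict lookups in a separate phase.
import Mathlib
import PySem

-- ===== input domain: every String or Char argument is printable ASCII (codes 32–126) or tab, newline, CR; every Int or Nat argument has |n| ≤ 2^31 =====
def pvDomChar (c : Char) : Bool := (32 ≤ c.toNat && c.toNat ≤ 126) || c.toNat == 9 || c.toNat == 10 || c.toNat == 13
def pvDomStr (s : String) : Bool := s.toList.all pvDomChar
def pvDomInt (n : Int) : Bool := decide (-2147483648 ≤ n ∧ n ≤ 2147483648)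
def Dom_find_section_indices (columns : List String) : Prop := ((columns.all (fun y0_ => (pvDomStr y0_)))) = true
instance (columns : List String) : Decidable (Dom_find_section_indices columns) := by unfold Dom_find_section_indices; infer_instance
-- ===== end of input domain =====

-- B separates index-building from section lookup: one pass builds a full column-name -> index
-- dict (last occurrence wins), then the four result entries are plain dict lookups.
-- ===== PORT A =====
def find_section_indices (columns : List String) : List (String × Option Int) :=
  let sections : PySem.Dict String (Option Int) :=
    ((((PySem.Dict.empty.insert "arr_start" none).insert "netchange_start" none).insert
        "reason_start" none).insert "filters_start" none)
  let sections := (PySem.List.enumerate columns).foldl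
    (fun s p =>
      let col_str := p.2   -- str(col): col is already a string
      if col_str == "ARR by Period by Product" then s.insert "arr_start" (some p.1)
      else if col_str == "Net Change by Period" then s.insert "netchange_start" (some p.1)
      else if col_str == "Net Change Reason by Period" then s.insert "reason_start" (some p.1)
      else if col_str == "Net Change Filters" then s.insert "filters_start" (some p.1)
      else s) sections
  sections.items

-- ===== PORT B =====
def pvSectionNames : List (String × String) :=
  [("ARR by Period by Product", "arr_start"),
   ("Net Change by Period", "netchange_start"),
   ("Net Change Reason by Period", "reason_start"),
   ("Net Change Filters", "filters_start")]

def find_section_indices_alt (columns : List String) : List (String × Option Int) :=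
  let col_index : PySem.Dict String Int :=
    (PySem.List.enumerate columns).foldl (fun d p => d.insert p.2 p.1) PySem.Dict.empty
  -- {key: col_index.get(name) for name, key in section_names}: the four keys are distinct,
  -- so the comprehension's items are exactly this map
  pvSectionNames.map (fun p => (p.2, col_index.get? p.1))

-- ===== PRECONDITION & SPEC =====
def Spec_find_section_indices (columns : List String) (out : List (String × Option Int)) : Prop := out = find_section_indices_alt columns
instance (columns : List String) (out : List (String × Option Int)) : Decidable (Spec_find_section_indices columns out) := by unfold Spec_find_section_indices; infer_instance

-- ===== CLAIM (what is proved, stated in full; the proofs are below) =====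
def Claim_equal_find_section_indices : Prop := ∀ (columns : List String), Dom_find_section_indices columns → Spec_find_section_indices columns (find_section_indices columns)

-- ===== LEMMAS AND PROOFS =====

-- ===== VERDICT (by name: the statement is the Claim_ definition above) =====
lemma step_inv (s : PySem.Dict String (Option Int)) (d : PySem.Dict String Int)
    (x : String) (i : Int)
    (h : s.items = pvSectionNames.map (fun p => (p.2, d.get? p.1))) :
    (if x == "ARR by Period by Product" then s.insert "arr_start" (some i)
      else if x == "Net Change by Period" then s.insert "netchange_start" (some i)
      else if x == "Net Change Reason by Period" then s.insert "reason_start" (some i)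
      else if x == "Net Change Filters" then s.insert "filters_start" (some i)
      else s).items
    = pvSectionNames.map (fun p => (p.2, (d.insert x i).get? p.1)) := by
  have hc : ∀ k ∈ ["arr_start", "netchange_start", "reason_start", "filters_start"],
      s.contains k = true := by
    intro k hk
    rw [PySem.Dict.contains_iff_mem_keys]
    simp only [PySem.Dict.keys, h, pvSectionNames]
    fin_cases hk <;> simp
  split_ifs with h1 h2 h3 h4
  · simp_all [pvSectionNames, PySem.Dict.items_insert, PySem.Dict.get?_insert, beq_iff_eq]
  · simp_all [pvSectionNames, PySem.Dict.items_insert, PySem.Dict.get?_insert, beq_iff_eq]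
  · simp_all [pvSectionNames, PySem.Dict.items_insert, PySem.Dict.get?_insert, beq_iff_eq]
  · simp_all [pvSectionNames, PySem.Dict.items_insert, PySem.Dict.get?_insert, beq_iff_eq]
  · rw [h]
    simp only [beq_iff_eq] at h1 h2 h3 h4
    simp [pvSectionNames, PySem.Dict.get?_insert, Ne.symm h1, Ne.symm h2, Ne.symm h3, Ne.symm h4]

lemma loop_inv (xs : List String) : ∀ (i : Int) (s : PySem.Dict String (Option Int))
    (d : PySem.Dict String Int),
    s.items = pvSectionNames.map (fun p => (p.2, d.get? p.1)) →
    ((PySem.List.enumerate xs i).foldl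
      (fun s p =>
        let col_str := p.2
        if col_str == "ARR by Period by Product" then s.insert "arr_start" (some p.1)
        else if col_str == "Net Change by Period" then s.insert "netchange_start" (some p.1)
        else if col_str == "Net Change Reason by Period" then s.insert "reason_start" (some p.1)
        else if col_str == "Net Change Filters" then s.insert "filters_start" (some p.1)
        else s) s).items
    = pvSectionNames.map (fun p =>
        (p.2, ((PySem.List.enumerate xs i).foldl (fun d p => d.insert p.2 p.1) d).get? p.1)) := by
  induction xs with
  | nil => intro i s d h; simpa [PySem.List.enumerate_nil] using h
  | cons x xs ih =>
    intro i s d h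
    rw [PySem.List.enumerate_cons]
    simp only [List.foldl_cons]
    exact ih (i + 1) _ _ (step_inv s d x i h)

theorem find_section_indices_spec : Claim_equal_find_section_indices := by
  intro columns _
  unfold Spec_find_section_indices find_section_indices find_section_indices_alt
  exact loop_inv columns 0 _ _ rfl
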